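-- pv_equiv track=rewrite | github.com/AdamZhouSE/pythonHomework | Code/CodeRecords/2523/60601/236774.py | solve
-- ===== SOURCE A (Python) =====
-- import collections
--
-- def solve(mat):
--     r, c = len(mat), len(mat[0])
--     data = collections.defaultdict(list)
--
--     for i in range(r):
--         for j in range(c):
--             data[i - j].append(mat[i][j])
--
--     for i in data:
--         data[i].sort()
--
--     for i in range(r):
--         for j in range(c):
--             mat[i][j] = data[i - j].pop(0)
--     return mat
-- ===== SOURCE B (Python) =====
-- def solve(mat):
--     # Simpler decomposition: handle one diagonal at a time (walk, sort once,
--     # index by position) instead of grouping every cell into a defaultdict and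
--     # popping. Like A, mutates mat in place and returns it.
--     r, c = len(mat), len(mat[0])
--     diags = {}
--     for d in range(-(c - 1), r):
--         i0 = d if d >= 0 else 0
--         j0 = i0 - d
--         n = min(r - i0, c - j0)
--         diags[d] = sorted(mat[i0 + t][j0 + t] for t in range(n))
--     for i in range(r):
--         row = mat[i]
--         for j in range(c):
--             row[j] = diags[i - j][min(i, j)]
--     return mat
-- ===== Notes on version B (the rewrite author's own statement) =====
-- stated objective: alternative
-- what changed: Instead of appending every cell into a defaultdict keyed by i-j and then popping each sorted bucket from the front during a second full scan, B walks each anti-diagonal once from its start cell, sorts it, and writes cell (i,j) as the min(i,j)-th element of its sorted diagonal.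
import Mathlib
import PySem

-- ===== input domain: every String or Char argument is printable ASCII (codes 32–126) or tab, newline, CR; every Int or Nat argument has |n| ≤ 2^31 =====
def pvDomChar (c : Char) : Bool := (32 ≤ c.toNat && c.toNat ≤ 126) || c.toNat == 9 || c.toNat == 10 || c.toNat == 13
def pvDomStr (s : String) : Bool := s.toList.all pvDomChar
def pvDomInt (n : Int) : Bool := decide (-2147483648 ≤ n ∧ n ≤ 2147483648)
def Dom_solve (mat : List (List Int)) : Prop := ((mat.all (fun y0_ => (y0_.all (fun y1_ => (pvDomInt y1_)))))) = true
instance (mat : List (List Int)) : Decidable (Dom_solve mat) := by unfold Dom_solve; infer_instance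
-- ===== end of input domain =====

-- B sorts each anti-diagonal once (walk, sort, index by position) instead of A's defaultdict
-- grouping + pop(0); both Pythons mutate mat in place, the theorems are about the return value.

-- ===== PORT A =====
-- phase 1: data[i-j].append(mat[i][j]) over all cells (defaultdict(list))
def aGroup (mat : List (List Int)) (r c : Int) : PySem.Dict Int (List Int) :=
  (PySem.List.pyRange 0 r 1).foldl (fun d i =>
    (PySem.List.pyRange 0 c 1).foldl (fun d j =>
      d.modify (i - j) [] (fun l => l ++ [PySem.List.pyGetD (PySem.List.pyGetD mat i []) j 0])) d)
    PySem.Dict.empty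

-- phase 2: for i in data: data[i].sort()
def aSort (d : PySem.Dict Int (List Int)) : PySem.Dict Int (List Int) :=
  d.keys.foldl (fun d k => d.insert k (PySem.List.sorted (d.getD k []) (fun x => x) false)) d

-- phase 3 body: mat[i][j] = data[i-j].pop(0)  (none = Python IndexError, unreachable inside Pre_)
def aStep (s : PySem.Dict Int (List Int) × List (List Int)) (i j : Int) :
    PySem.Dict Int (List Int) × List (List Int) :=
  match PySem.List.pop? (s.1.getD (i - j) []) 0 with
  | some p => (s.1.insert (i - j) p.2, s.2.set i.toNat ((PySem.List.pyGetD s.2 i []).set j.toNat p.1))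
  | none => s

def aWrite (r c : Int) (s : PySem.Dict Int (List Int) × List (List Int)) :
    PySem.Dict Int (List Int) × List (List Int) :=
  (PySem.List.pyRange 0 r 1).foldl (fun s i =>
    (PySem.List.pyRange 0 c 1).foldl (fun s j => aStep s i j) s) s

def solve (mat : List (List Int)) : List (List Int) :=
  let r : Int := mat.length
  let c : Int := (PySem.List.pyGetD mat 0 []).length  -- len(mat[0]): IndexError on [] (outside Pre_)
  (aWrite r c (aSort (aGroup mat r c), mat)).2

-- ===== PORT B =====
-- the values of one diagonal, walked from its start cell (the genexp in Source B)
def bWalk (mat : List (List Int)) (r c d : Int) : List Int :=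
  let i0 : Int := if 0 ≤ d then d else 0
  let j0 : Int := i0 - d
  let n : Int := min (r - i0) (c - j0)
  (PySem.List.pyRange 0 n 1).map
    (fun t => PySem.List.pyGetD (PySem.List.pyGetD mat (i0 + t) []) (j0 + t) 0)

def bDiag (mat : List (List Int)) (r c d : Int) : List Int :=
  PySem.List.sorted (bWalk mat r c d) (fun x => x) false

def bDiags (mat : List (List Int)) (r c : Int) : PySem.Dict Int (List Int) :=
  (PySem.List.pyRange (-(c - 1)) r 1).foldl (fun dct d => dct.insert d (bDiag mat r c d))
    PySem.Dict.empty

-- row[j] = diags[i-j][min(i, j)]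
def bRow (diags : PySem.Dict Int (List Int)) (c i : Int) (row : List Int) : List Int :=
  (PySem.List.pyRange 0 c 1).foldl
    (fun rw j => rw.set j.toNat (PySem.List.pyGetD (diags.getD (i - j) []) (min i j) 0)) row

def solve_alt (mat : List (List Int)) : List (List Int) :=
  let r : Int := mat.length
  let c : Int := (PySem.List.pyGetD mat 0 []).length  -- len(mat[0]): IndexError on [] (outside Pre_)
  let diags := bDiags mat r c
  (PySem.List.pyRange 0 r 1).foldl
    (fun m i => m.set i.toNat (bRow diags c i (PySem.List.pyGetD m i []))) mat

-- ===== PRECONDITION & SPEC =====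
-- Pre_ excludes exactly the inputs where Python A raises IndexError: the empty matrix
-- (len(mat[0])) and matrices with a row shorter than row 0 (mat[i][j] for j < c).
def Pre_solve (mat : List (List Int)) : Prop :=
  mat ≠ [] ∧ ∀ row ∈ mat, (mat.headD []).length ≤ row.length
instance (mat : List (List Int)) : Decidable (Pre_solve mat) := by unfold Pre_solve; infer_instance

def pvWitness_solve : List (List Int) := [[3, 1], [2, 0]]

def Spec_solve (mat : List (List Int)) (out : List (List Int)) : Prop := out = solve_alt mat
instance (mat : List (List Int)) (out : List (List Int)) : Decidable (Spec_solve mat out) := by unfold Spec_solve; infer_instance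

-- ===== CLAIM (what is proved, stated in full; the proofs are below) =====
def Claim_equal_solve : Prop := ∀ (mat : List (List Int)), Dom_solve mat → Pre_solve mat → Spec_solve mat (solve mat)

-- ===== LEMMAS AND PROOFS =====

-- number of cells of diagonal d that lie strictly before cell (i, j) in row-major order
def cnt (c d i j : Int) : Nat :=
  ((min i (d + c)).toNat - (max d 0).toNat) + (if 0 ≤ i - d ∧ i - d < j then 1 else 0)

theorem cnt_zero (c d : Int) : cnt c d 0 0 = 0 := by
  unfold cnt; split_ifs with h <;> omega

theorem cnt_succ_self (c i j : Int) (hj : 0 ≤ j) (hjc : j < c) (hi : 0 ≤ i) :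
    cnt c (i - j) i (j + 1) = cnt c (i - j) i j + 1 := by
  unfold cnt; split_ifs with h1 h2 <;> omega

theorem cnt_succ_ne (c d i j : Int) (hd : d ≠ i - j) : cnt c d i (j + 1) = cnt c d i j := by
  unfold cnt; split_ifs with h1 h2 <;> omega

theorem cnt_row_end (c d i : Int) (hi : 0 ≤ i) : cnt c d i c = cnt c d (i + 1) 0 := by
  unfold cnt; split_ifs with h1 h2 <;> omega

theorem cnt_lt_len (mat : List (List Int)) (r c i j : Int)
    (hi : 0 ≤ i) (hir : i < r) (hj : 0 ≤ j) (hjc : j < c) :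
    cnt c (i - j) i j = (min i j).toNat ∧
    (min i j).toNat < (bWalk mat r c (i - j)).length := by
  unfold cnt bWalk
  simp only [List.length_map, PySem.List.length_pyRange_one]
  split_ifs with h1 h2 <;> omega


theorem filter_pyRange_beq (v : Int) : ∀ (n : Nat) (a b : Int), b - a ≤ n →
    (PySem.List.pyRange a b 1).filter (fun x => x == v) = if a ≤ v ∧ v < b then [v] else [] := by
  intro n
  induction n with
  | zero =>
    intro a b h
    rw [PySem.List.pyRange_one_eq_nil (by omega)]
    split_ifs with hc
    · omega
    · rfl
  | succ n ih =>
    intro a b h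
    by_cases hab : b ≤ a
    · rw [PySem.List.pyRange_one_eq_nil hab]
      split_ifs with hc
      · omega
      · rfl
    · rw [PySem.List.pyRange_one_cons (by omega)]
      rw [List.filter_cons]
      rw [ih (a + 1) b (by omega)]
      by_cases hav : a = v
      · subst hav
        simp only [BEq.rfl, if_pos]
        split_ifs with h1 h2 <;> first | rfl | omega
      · have : (a == v) = false := by simp [hav]
        rw [this]
        simp only [Bool.false_eq_true, if_false]
        split_ifs with h1 h2 <;> first | rfl | omega

theorem inner_fold_getD (mat : List (List Int)) (c i : Int)
    (dct : PySem.Dict Int (List Int)) (x : Int) :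
    ((PySem.List.pyRange 0 c 1).foldl (fun d j =>
        d.modify (i - j) [] (fun l => l ++ [PySem.List.pyGetD (PySem.List.pyGetD mat i []) j 0])) dct).getD x []
      = dct.getD x [] ++
        (if 0 ≤ i - x ∧ i - x < c then [PySem.List.pyGetD (PySem.List.pyGetD mat i []) (i - x) 0] else []) := by
  have h := PySem.Dict.getD_foldl_modify_append
    ((PySem.List.pyRange 0 c 1).map (fun j => ((i - j : Int), PySem.List.pyGetD (PySem.List.pyGetD mat i []) j 0)))
    dct x
  rw [List.foldl_map] at h
  rw [h, List.filter_map]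
  have hcong : ((PySem.List.pyRange 0 c 1).filter
      ((fun (p : Int × Int) => p.1 == x) ∘ (fun j => ((i - j : Int), PySem.List.pyGetD (PySem.List.pyGetD mat i []) j 0))))
      = (PySem.List.pyRange 0 c 1).filter (fun j => j == i - x) := by
    apply List.filter_congr
    intro j _
    simp only [Function.comp]
    rw [Bool.eq_iff_iff]
    simp only [beq_iff_eq]
    omega
  rw [hcong, filter_pyRange_beq (i - x) c.toNat 0 c (by omega), List.map_map]
  congr 1
  split_ifs with h1 <;> simp

theorem outer_fold_getD (mat : List (List Int)) (c : Int) :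
    ∀ (l : List Int) (dct : PySem.Dict Int (List Int)) (x : Int),
    (l.foldl (fun d i => (PySem.List.pyRange 0 c 1).foldl (fun d j =>
        d.modify (i - j) [] (fun l => l ++ [PySem.List.pyGetD (PySem.List.pyGetD mat i []) j 0])) d) dct).getD x []
    = dct.getD x [] ++ l.flatMap (fun i =>
        if 0 ≤ i - x ∧ i - x < c then [PySem.List.pyGetD (PySem.List.pyGetD mat i []) (i - x) 0] else []) := by
  intro l
  induction l with
  | nil => intro dct x; simp
  | cons a t ih =>
    intro dct x
    rw [List.foldl_cons, ih, inner_fold_getD, List.flatMap_cons, List.append_assoc]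

theorem flatMap_pyRange_if {α : Type} (g : Int → α) (lo hi : Int) :
    ∀ (n : Nat) (r : Int), 0 ≤ r → r ≤ n →
    (PySem.List.pyRange 0 r 1).flatMap (fun i => if lo ≤ i ∧ i < hi then [g i] else [])
      = (PySem.List.pyRange 0 (min r hi - max lo 0) 1).map (fun t => g (max lo 0 + t)) := by
  intro n
  induction n with
  | zero =>
    intro r h0 hn
    have : r = 0 := by omega
    subst this
    rw [PySem.List.pyRange_one_eq_nil (by omega), PySem.List.pyRange_one_eq_nil (by omega)]
    rfl
  | succ n ih =>
    intro r h0 hn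
    by_cases hr : r = 0
    · subst hr
      rw [PySem.List.pyRange_one_eq_nil (by omega), PySem.List.pyRange_one_eq_nil (by omega)]
      rfl
    · obtain ⟨m, rfl⟩ : ∃ m, r = m + 1 := ⟨r - 1, by omega⟩
      rw [PySem.List.pyRange_one_succ_right (by omega), List.flatMap_append, ih m (by omega) (by omega)]
      by_cases hcond : lo ≤ m ∧ m < hi
      · rw [show min (m + 1) hi - max lo 0 = (min m hi - max lo 0) + 1 by omega]
        rw [PySem.List.pyRange_one_succ_right (by omega), List.map_append]
        simp only [List.flatMap_cons, List.flatMap_nil, List.append_nil, if_pos hcond,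
          List.map_cons, List.map_nil]
        have hm : max lo 0 + (min m hi - max lo 0) = m := by omega
        rw [hm]
      · simp only [List.flatMap_cons, List.flatMap_nil, List.append_nil, if_neg hcond]
        by_cases h2 : hi ≤ m
        · rw [show min (m + 1) hi = min m hi by omega]
        · rw [PySem.List.pyRange_one_eq_nil (by omega), PySem.List.pyRange_one_eq_nil (by omega)]

theorem bWalk_eq (mat : List (List Int)) (r c d : Int) :
    bWalk mat r c d
      = (PySem.List.pyRange 0 (min (r - (if 0 ≤ d then d else 0)) (c - ((if 0 ≤ d then d else 0) - d))) 1).map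
          (fun t => PySem.List.pyGetD (PySem.List.pyGetD mat ((if 0 ≤ d then d else 0) + t) [])
            (((if 0 ≤ d then d else 0) - d) + t) 0) := rfl

theorem phase1_getD (mat : List (List Int)) (r c : Int) (hr : 0 ≤ r) (d : Int) :
    (aGroup mat r c).getD d [] = bWalk mat r c d := by
  unfold aGroup
  rw [bWalk_eq, outer_fold_getD, PySem.Dict.getD_empty, List.nil_append]
  have hfun : (fun (i : Int) =>
      if 0 ≤ i - d ∧ i - d < c then [PySem.List.pyGetD (PySem.List.pyGetD mat i []) (i - d) 0] else [])
      = (fun (i : Int) =>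
      if d ≤ i ∧ i < d + c then [PySem.List.pyGetD (PySem.List.pyGetD mat i []) (i - d) 0] else []) := by
    funext i
    split_ifs with h1 h2 <;> first | rfl | omega
  rw [hfun, flatMap_pyRange_if _ d (d + c) r.toNat r hr (by omega)]
  have hi0 : (if (0 : Int) ≤ d then d else 0) = max d 0 := by split_ifs <;> omega
  rw [hi0]
  rw [show min (r - max d 0) (c - (max d 0 - d)) = min r (d + c) - max d 0 by omega]
  apply List.map_congr_left
  intro t _
  rw [show max d 0 - d + t = max d 0 + t - d by ring]

theorem nodup_keys_aGroup_aux (mat : List (List Int)) (c : Int) (l : List Int) :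
    ∀ (d0 : PySem.Dict Int (List Int)), d0.keys.Nodup →
    (l.foldl (fun d i => (PySem.List.pyRange 0 c 1).foldl (fun d j =>
        d.modify (i - j) [] (fun l => l ++ [PySem.List.pyGetD (PySem.List.pyGetD mat i []) j 0])) d) d0).keys.Nodup := by
  induction l with
  | nil => exact fun _ h => h
  | cons a t ih =>
    intro d0 h
    rw [List.foldl_cons]
    exact ih _ (PySem.Dict.nodup_keys_foldl_modify_key _ (fun j => a - j) []
      (fun _ j => fun l => l ++ [PySem.List.pyGetD (PySem.List.pyGetD mat a []) j 0]) d0 h)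

theorem nodup_keys_aGroup (mat : List (List Int)) (r c : Int) : (aGroup mat r c).keys.Nodup :=
  nodup_keys_aGroup_aux mat c _ _ PySem.Dict.nodup_keys_empty

theorem sortfold (keys : List Int) : ∀ (dct : PySem.Dict Int (List Int)), keys.Nodup → ∀ x,
    (keys.foldl (fun d k => d.insert k (PySem.List.sorted (d.getD k []) (fun x => x) false)) dct).getD x []
    = if x ∈ keys then PySem.List.sorted (dct.getD x []) (fun x => x) false else dct.getD x [] := by
  induction keys with
  | nil => intro dct _ x; simp
  | cons a t ih =>
    intro dct hnd x
    obtain ⟨ha, ht⟩ := List.nodup_cons.mp hnd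
    rw [List.foldl_cons, ih _ ht x]
    by_cases hxt : x ∈ t
    · have hxa : x ≠ a := fun h => ha (h ▸ hxt)
      rw [if_pos hxt, if_pos (List.mem_cons.mpr (Or.inr hxt)), PySem.Dict.getD_insert_of_ne _ _ _ hxa]
    · rw [if_neg hxt]
      by_cases hxa : x = a
      · subst hxa
        rw [PySem.Dict.getD_insert_self, if_pos (List.mem_cons_self)]
      · rw [PySem.Dict.getD_insert_of_ne _ _ _ hxa, if_neg (by simp [hxa, hxt])]

theorem aSort_getD (mat : List (List Int)) (r c : Int) (d : Int) :
    (aSort (aGroup mat r c)).getD d [] =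
      PySem.List.sorted ((aGroup mat r c).getD d []) (fun x => x) false := by
  unfold aSort
  rw [sortfold _ _ (nodup_keys_aGroup mat r c) d]
  split_ifs with h
  · rfl
  · have hz : (aGroup mat r c).getD d [] = [] := by
      apply PySem.Dict.getD_of_not_contains
      rw [PySem.Dict.contains_eq_decide_mem_keys]
      simp [h]
    rw [hz, (PySem.List.sorted_eq_nil_iff _ _ _).mpr rfl]

theorem insfold (F : Int → List Int) (l : List Int) : ∀ (dct : PySem.Dict Int (List Int)) (x : Int),
    (l.foldl (fun dc d => dc.insert d (F d)) dct).getD x [] = if x ∈ l then F x else dct.getD x [] := by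
  induction l with
  | nil => intro dct x; simp
  | cons a t ih =>
    intro dct x
    rw [List.foldl_cons, ih]
    by_cases hxt : x ∈ t
    · rw [if_pos hxt, if_pos (List.mem_cons.mpr (Or.inr hxt))]
    · rw [if_neg hxt]
      by_cases hxa : x = a
      · subst hxa
        rw [PySem.Dict.getD_insert_self, if_pos (List.mem_cons_self)]
      · rw [PySem.Dict.getD_insert_of_ne _ _ _ hxa, if_neg (by simp [hxa, hxt])]

theorem bDiags_getD (mat : List (List Int)) (r c d : Int) (h1 : -(c - 1) ≤ d) (h2 : d < r) :
    (bDiags mat r c).getD d [] = bDiag mat r c d := by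
  unfold bDiags
  rw [insfold, if_pos (PySem.List.mem_pyRange_one.mpr ⟨h1, h2⟩)]


theorem bDiag_len_lt (mat : List (List Int)) (r c i j : Int)
    (hi : 0 ≤ i) (hir : i < r) (hj : 0 ≤ j) (hjc : j < c) :
    (min i j).toNat < (bDiag mat r c (i - j)).length := by
  unfold bDiag
  rw [PySem.List.length_sorted]
  exact (cnt_lt_len mat r c i j hi hir hj hjc).2

theorem inner_loop (mat : List (List Int)) (r c : Int) (hr : r = (mat.length : Int))
    (diags : PySem.Dict Int (List Int))
    (hdiags : ∀ d, -(c - 1) ≤ d → d < r → diags.getD d [] = bDiag mat r c d)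
    (i : Int) (hi : 0 ≤ i) (hir : i < r) :
    ∀ (n : Nat) (j : Int), 0 ≤ j → j + n = c →
    ∀ (dct : PySem.Dict Int (List Int)) (rw : List Int) (mB : List (List Int)),
      mB.length = mat.length →
      (∀ d, dct.getD d [] = (bDiag mat r c d).drop (cnt c d i j)) →
      ((PySem.List.pyRange j c 1).foldl (fun s jj => aStep s i jj) (dct, mB.set i.toNat rw)).2
        = mB.set i.toNat ((PySem.List.pyRange j c 1).foldl
            (fun rw jj => rw.set jj.toNat (PySem.List.pyGetD (diags.getD (i - jj) []) (min i jj) 0)) rw)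
      ∧ ∀ d, ((PySem.List.pyRange j c 1).foldl (fun s jj => aStep s i jj) (dct, mB.set i.toNat rw)).1.getD d []
          = (bDiag mat r c d).drop (cnt c d i c) := by
  intro n
  induction n with
  | zero =>
    intro j hj hjn dct rw mB hlen hinv
    obtain rfl : j = c := by omega
    rw [PySem.List.pyRange_one_eq_nil le_rfl]
    exact ⟨rfl, hinv⟩
  | succ n ih =>
    intro j hj hjn dct rw mB hlen hinv
    have hjc : j < c := by omega
    obtain ⟨hcnt, _⟩ := cnt_lt_len mat r c i j hi hir hj hjc
    have hlt : (min i j).toNat < (bDiag mat r c (i - j)).length :=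
      bDiag_len_lt mat r c i j hi hir hj hjc
    have hdrop := List.drop_eq_getElem_cons hlt
    have hgetrow : PySem.List.pyGetD (mB.set i.toNat rw) i [] = rw := by
      rw [PySem.List.pyGetD_of_nonneg _ _ hi, List.getD_eq_getElem?_getD,
        List.getElem?_set_self (by omega), Option.getD_some]
    have hstep : aStep (dct, mB.set i.toNat rw) i j
        = (dct.insert (i - j) ((bDiag mat r c (i - j)).drop ((min i j).toNat + 1)),
           mB.set i.toNat (rw.set j.toNat ((bDiag mat r c (i - j))[(min i j).toNat]))) := by
      unfold aStep
      simp only [hinv (i - j), hcnt, hdrop, PySem.List.pop?_zero_cons, hgetrow, List.set_set]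
    have hb : PySem.List.pyGetD (diags.getD (i - j) []) (min i j) 0
        = (bDiag mat r c (i - j))[(min i j).toNat] := by
      rw [hdiags (i - j) (by omega) (by omega),
        PySem.List.pyGetD_of_nonneg _ _ (le_min hi hj), List.getD_eq_getElem _ _ hlt]
    have hinv' : ∀ d, (dct.insert (i - j) ((bDiag mat r c (i - j)).drop ((min i j).toNat + 1))).getD d []
        = (bDiag mat r c d).drop (cnt c d i (j + 1)) := by
      intro d
      by_cases hd : d = i - j
      · subst hd
        rw [PySem.Dict.getD_insert_self, cnt_succ_self c i j hj hjc hi, hcnt]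
      · rw [PySem.Dict.getD_insert_of_ne _ _ _ hd, cnt_succ_ne c d i j hd, hinv d]
    rw [PySem.List.pyRange_one_cons hjc, List.foldl_cons, List.foldl_cons, hstep, hb]
    exact ih (j + 1) (by omega) (by omega) _ _ mB hlen hinv'

theorem outer_loop (mat : List (List Int)) (r c : Int) (hr : r = (mat.length : Int)) (hc : 0 ≤ c)
    (diags : PySem.Dict Int (List Int))
    (hdiags : ∀ d, -(c - 1) ≤ d → d < r → diags.getD d [] = bDiag mat r c d) :
    ∀ (n : Nat) (i : Int), 0 ≤ i → i + n = r →
    ∀ (dct : PySem.Dict Int (List Int)) (mB : List (List Int)),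
      mB.length = mat.length →
      (∀ d, dct.getD d [] = (bDiag mat r c d).drop (cnt c d i 0)) →
      ((PySem.List.pyRange i r 1).foldl (fun s ii =>
          (PySem.List.pyRange 0 c 1).foldl (fun s j => aStep s ii j) s) (dct, mB)).2
        = (PySem.List.pyRange i r 1).foldl
            (fun m ii => m.set ii.toNat (bRow diags c ii (PySem.List.pyGetD m ii []))) mB := by
  intro n
  induction n with
  | zero =>
    intro i hi hin dct mB hlen hinv
    obtain rfl : i = r := by omega
    rw [PySem.List.pyRange_one_eq_nil le_rfl]
    rfl
  | succ n ih =>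
    intro i hi hin dct mB hlen hinv
    have hir : i < r := by omega
    have hidx : i.toNat < mB.length := by omega
    have hset : mB.set i.toNat (PySem.List.pyGetD mB i []) = mB := by
      rw [PySem.List.pyGetD_of_nonneg _ _ hi, List.getD_eq_getElem _ _ hidx,
        List.set_getElem_self]
    obtain ⟨h1, h2⟩ := inner_loop mat r c hr diags hdiags i hi hir c.toNat 0 le_rfl (by omega)
      dct (PySem.List.pyGetD mB i []) mB hlen (by
        intro d
        rw [hinv d])
    rw [PySem.List.pyRange_one_cons hir, List.foldl_cons, List.foldl_cons]
    rw [hset] at h1 h2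
    have h1' : ((PySem.List.pyRange 0 c 1).foldl (fun s j => aStep s i j) (dct, mB)).2
        = mB.set i.toNat (bRow diags c i (PySem.List.pyGetD mB i [])) := h1
    have hpair : (PySem.List.pyRange 0 c 1).foldl (fun s j => aStep s i j) (dct, mB)
        = (((PySem.List.pyRange 0 c 1).foldl (fun s j => aStep s i j) (dct, mB)).1,
           mB.set i.toNat (bRow diags c i (PySem.List.pyGetD mB i []))) :=
      Prod.ext rfl h1'
    rw [hpair]
    rw [ih (i + 1) (by omega) (by omega) _ _ (by rw [List.length_set, hlen]) (by
      intro d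
      rw [h2 d, cnt_row_end c d i hi])]

theorem solve_spec : Claim_equal_solve := by
  unfold Claim_equal_solve Spec_solve
  intro mat _ _
  show (aWrite (mat.length : Int) ((PySem.List.pyGetD mat 0 []).length : Int)
      (aSort (aGroup mat (mat.length : Int) ((PySem.List.pyGetD mat 0 []).length : Int)), mat)).2
    = (PySem.List.pyRange 0 (mat.length : Int) 1).foldl
        (fun m i => m.set i.toNat (bRow (bDiags mat (mat.length : Int) ((PySem.List.pyGetD mat 0 []).length : Int))
          ((PySem.List.pyGetD mat 0 []).length : Int) i (PySem.List.pyGetD m i []))) mat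
  unfold aWrite
  exact outer_loop mat _ _ rfl (by positivity) _
    (fun d h1 h2 => bDiags_getD mat _ _ d h1 h2)
    mat.length 0 le_rfl (by omega) _ mat rfl (by
      intro d
      rw [aSort_getD, phase1_getD mat _ _ (by positivity) d, cnt_zero]
      rfl)
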